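-- pv_equiv track=rewrite | github.com/MeHalogen/RoadWiseAI | intervener_kb.py | _estimate_effectiveness
-- ===== SOURCE A (Python) =====
-- def _estimate_effectiveness(problem_text: str, intervention_text: str) -> str:
--     """Estimate effectiveness based on problem and intervention match."""
--     problem_lower = problem_text.lower()
--     intervention_lower = intervention_text.lower()
--
--     # High effectiveness for direct matches
--     if ('visibility' in problem_lower and any(word in intervention_lower for word in ['sign', 'marking', 'light'])):
--         return 'Very High'
--     elif ('speed' in problem_lower and any(word in intervention_lower for word in ['bump', 'limit', 'calm'])):
--         return 'Very High'
--     elif ('accident' in problem_lower and any(word in intervention_lower for word in ['barrier', 'guardrail'])):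
--         return 'Very High'
--     else:
--         return 'High'
-- ===== SOURCE B (Python) =====
-- _PROBLEM_CATS = (('vis', 'visibility'), ('spd', 'speed'), ('acc', 'accident'))
-- _INTERVENTION_CATS = (('sign', 'vis'), ('marking', 'vis'), ('light', 'vis'),
--                       ('bump', 'spd'), ('limit', 'spd'), ('calm', 'spd'),
--                       ('barrier', 'acc'), ('guardrail', 'acc'))
--
--
-- def _estimate_effectiveness(problem_text: str, intervention_text: str) -> str:
--     """Estimate effectiveness based on problem and intervention match."""
--     problem_lower = problem_text.lower()
--     intervention_lower = intervention_text.lower()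
--     problem_cats = {cat for cat, kw in _PROBLEM_CATS if kw in problem_lower}
--     intervention_cats = {cat for w, cat in _INTERVENTION_CATS if w in intervention_lower}
--     return 'Very High' if problem_cats & intervention_cats else 'High'
-- ===== Notes on version B (the rewrite author's own statement) =====
-- stated objective: alternative
-- what changed: Instead of a first-match if/elif chain, B tags the problem text and the intervention text independently with category sets in two staged passes and returns 'Very High' iff the two sets intersect; correct because every branch of A returns the same value, so first-match order is irrelevant.
import Mathlib
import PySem

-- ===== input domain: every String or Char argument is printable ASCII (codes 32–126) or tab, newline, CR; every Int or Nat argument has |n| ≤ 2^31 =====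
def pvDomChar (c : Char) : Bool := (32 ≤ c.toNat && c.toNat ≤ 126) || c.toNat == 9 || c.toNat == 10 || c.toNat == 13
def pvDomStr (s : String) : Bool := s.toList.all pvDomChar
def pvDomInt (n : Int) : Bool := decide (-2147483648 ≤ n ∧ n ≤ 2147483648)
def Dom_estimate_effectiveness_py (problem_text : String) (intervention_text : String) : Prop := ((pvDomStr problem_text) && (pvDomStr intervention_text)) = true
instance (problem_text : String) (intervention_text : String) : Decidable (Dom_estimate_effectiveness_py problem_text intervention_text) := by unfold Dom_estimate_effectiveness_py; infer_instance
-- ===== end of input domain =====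

-- B replaces A's first-match if/elif chain by two independent tagging passes
-- (category set of the problem text, category set of the intervention text)
-- and a set intersection; valid because every branch of A returns the same value.

-- ===== PORT A =====
def estimate_effectiveness_py (problem_text : String) (intervention_text : String) : String :=
  let problem_lower := PySem.Str.lower problem_text
  let intervention_lower := PySem.Str.lower intervention_text
  if PySem.Str.isIn "visibility" problem_lower &&
     (["sign", "marking", "light"].any (fun word => PySem.Str.isIn word intervention_lower)) then
    "Very High"
  else if PySem.Str.isIn "speed" problem_lower &&
     (["bump", "limit", "calm"].any (fun word => PySem.Str.isIn word intervention_lower)) then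
    "Very High"
  else if PySem.Str.isIn "accident" problem_lower &&
     (["barrier", "guardrail"].any (fun word => PySem.Str.isIn word intervention_lower)) then
    "Very High"
  else
    "High"

-- ===== PORT B =====
def pvProblemCats : List (String × String) :=
  [("vis", "visibility"), ("spd", "speed"), ("acc", "accident")]

def pvInterventionCats : List (String × String) :=
  [("sign", "vis"), ("marking", "vis"), ("light", "vis"),
   ("bump", "spd"), ("limit", "spd"), ("calm", "spd"),
   ("barrier", "acc"), ("guardrail", "acc")]

def estimate_effectiveness_py_alt (problem_text : String) (intervention_text : String) : String :=
  let problem_lower := PySem.Str.lower problem_text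
  let intervention_lower := PySem.Str.lower intervention_text
  let problem_cats : PySem.Set String :=
    pvProblemCats.foldl
      (fun s ck => if PySem.Str.isIn ck.2 problem_lower then PySem.Set.add s ck.1 else s)
      PySem.Set.empty
  let intervention_cats : PySem.Set String :=
    pvInterventionCats.foldl
      (fun s wc => if PySem.Str.isIn wc.1 intervention_lower then PySem.Set.add s wc.2 else s)
      PySem.Set.empty
  if (PySem.Set.inter problem_cats intervention_cats).isEmpty then "High" else "Very High"

-- ===== PRECONDITION & SPEC =====
def Spec_estimate_effectiveness_py (problem_text : String) (intervention_text : String) (out : String) : Prop := out = estimate_effectiveness_py_alt problem_text intervention_text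
instance (problem_text : String) (intervention_text : String) (out : String) : Decidable (Spec_estimate_effectiveness_py problem_text intervention_text out) := by unfold Spec_estimate_effectiveness_py; infer_instance

-- ===== CLAIM =====
def Claim_equal_estimate_effectiveness_py : Prop := ∀ (problem_text : String) (intervention_text : String), Dom_estimate_effectiveness_py problem_text intervention_text → Spec_estimate_effectiveness_py problem_text intervention_text (estimate_effectiveness_py problem_text intervention_text)

-- ===== LEMMAS AND PROOFS =====

-- A and B as functions of the eleven substring-test booleans: the if/elif chain
-- equals the set-intersection test for every valuation.
theorem pv_key (b1 b2 b3 c1 c2 c3 c4 c5 c6 c7 c8 : Bool) :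
    (if b1 && (c1 || (c2 || (c3 || false))) then "Very High"
     else if b2 && (c4 || (c5 || (c6 || false))) then "Very High"
     else if b3 && (c7 || (c8 || false)) then "Very High"
     else "High")
  = (let s1 : PySem.Set String := if b1 then PySem.Set.add PySem.Set.empty "vis" else PySem.Set.empty
     let s2 : PySem.Set String := if b2 then PySem.Set.add s1 "spd" else s1
     let sp : PySem.Set String := if b3 then PySem.Set.add s2 "acc" else s2
     let t1 : PySem.Set String := if c1 then PySem.Set.add PySem.Set.empty "vis" else PySem.Set.empty
     let t2 : PySem.Set String := if c2 then PySem.Set.add t1 "vis" else t1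
     let t3 : PySem.Set String := if c3 then PySem.Set.add t2 "vis" else t2
     let t4 : PySem.Set String := if c4 then PySem.Set.add t3 "spd" else t3
     let t5 : PySem.Set String := if c5 then PySem.Set.add t4 "spd" else t4
     let t6 : PySem.Set String := if c6 then PySem.Set.add t5 "spd" else t5
     let t7 : PySem.Set String := if c7 then PySem.Set.add t6 "acc" else t6
     let ti : PySem.Set String := if c8 then PySem.Set.add t7 "acc" else t7
     if (PySem.Set.inter sp ti).isEmpty then "High" else "Very High") := by
  revert b1 b2 b3 c1 c2 c3 c4 c5 c6 c7 c8
  decide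

-- ===== VERDICT =====
theorem estimate_effectiveness_py_spec : Claim_equal_estimate_effectiveness_py := by
  intro p i _
  exact pv_key
    (PySem.Str.isIn "visibility" (PySem.Str.lower p))
    (PySem.Str.isIn "speed" (PySem.Str.lower p))
    (PySem.Str.isIn "accident" (PySem.Str.lower p))
    (PySem.Str.isIn "sign" (PySem.Str.lower i))
    (PySem.Str.isIn "marking" (PySem.Str.lower i))
    (PySem.Str.isIn "light" (PySem.Str.lower i))
    (PySem.Str.isIn "bump" (PySem.Str.lower i))
    (PySem.Str.isIn "limit" (PySem.Str.lower i))
    (PySem.Str.isIn "calm" (PySem.Str.lower i))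
    (PySem.Str.isIn "barrier" (PySem.Str.lower i))
    (PySem.Str.isIn "guardrail" (PySem.Str.lower i))
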